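-- pv_equiv track=rewrite | github.com/Incend1ary/firstrepo | homework3.py | big_first_letter
-- ===== SOURCE A (Python) =====
-- def big_first_letter(words):
--     s = ""
--     for word in words.split():
--         chars = 0
--         for char in word:
--             if 97<=ord(char)<=122:
--                 chars+= 1
--         if chars == len(word):
--             s += word.title() + " "
--         else:
--             s = "можно использовать только маленькие латинские буквы"
--             break
--     return s
-- ===== SOURCE B (Python) =====
-- def big_first_letter(words):
--     ws = words.split()
--     if all(97 <= ord(c) <= 122 for w in ws for c in w):
--         return ''.join(w[0].upper() + w[1:] + ' ' for w in ws)
--     return "можно использовать только маленькие латинские буквы"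
-- ===== Notes on version B (the rewrite author's own statement) =====
-- stated objective: simpler
-- what changed: A interleaves per-word validation with incremental string building and a break on failure; B separates the phases: split once, validate the whole word list with all(), then build the result in a single join (capitalizing via w[0].upper()+w[1:] instead of str.title()).
import Mathlib
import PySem

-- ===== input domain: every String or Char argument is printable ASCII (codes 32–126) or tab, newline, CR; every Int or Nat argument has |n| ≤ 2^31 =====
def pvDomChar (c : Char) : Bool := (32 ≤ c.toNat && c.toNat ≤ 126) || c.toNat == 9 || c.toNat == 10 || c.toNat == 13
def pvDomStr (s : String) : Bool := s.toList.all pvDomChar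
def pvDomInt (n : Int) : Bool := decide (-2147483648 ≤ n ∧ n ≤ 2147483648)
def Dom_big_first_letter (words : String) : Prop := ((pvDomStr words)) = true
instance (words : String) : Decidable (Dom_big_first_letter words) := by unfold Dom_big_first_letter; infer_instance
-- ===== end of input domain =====

-- B re-decomposes A's interleaved check-append-or-break loop into two phases (validate the
-- whole input, then build the result in one join); simpler, same asymptotic cost.

-- ===== PORT A =====
-- port of Python str.title(); exact on ASCII text (the only text A applies it to under Dom)
def pvTitle (w : List Char) : List Char :=
  (w.foldl (fun acc c =>
      if PySem.Chars.isalpha c then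
        (acc.1 ++ [if acc.2 then PySem.Chars.lowerChar c else PySem.Chars.upperChar c], true)
      else (acc.1 ++ [c], false)) (([] : List Char), false)).1

-- the loop: for word in words.split(): count lowercase chars; append word.title()+" " or set error and break
def bflLoop : List (List Char) → List Char → List Char
  | [], s => s
  | w :: ws, s =>
    let chars := w.foldl (fun n c => if 97 ≤ c.toNat ∧ c.toNat ≤ 122 then n + 1 else n) (0 : Nat)
    if chars = w.length then bflLoop ws (s ++ pvTitle w ++ [' '])
    else "можно использовать только маленькие латинские буквы".toList

def big_first_letter (words : String) : String :=
  String.mk (bflLoop (PySem.Chars.split₀ words.toList) [])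

-- ===== PORT B =====
def pvValidWord (w : List Char) : Bool :=
  w.all (fun c => decide (97 ≤ c.toNat) && decide (c.toNat ≤ 122))

-- w[0].upper() + w[1:]; only applied to words produced by split(), which are nonempty
def pvCap : List Char → List Char
  | [] => []
  | c :: cs => PySem.Chars.upperChar c :: cs

def big_first_letter_alt (words : String) : String :=
  let ws := PySem.Chars.split₀ words.toList
  if ws.all pvValidWord then
    String.mk ((ws.map (fun w => pvCap w ++ [' '])).flatten)
  else
    "можно использовать только маленькие латинские буквы"

-- ===== PRECONDITION & SPEC =====
def Spec_big_first_letter (words : String) (out : String) : Prop := out = big_first_letter_alt words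
instance (words : String) (out : String) : Decidable (Spec_big_first_letter words out) := by unfold Spec_big_first_letter; infer_instance

-- ===== CLAIM (what is proved, stated in full; the proofs are below) =====
def Claim_equal_big_first_letter : Prop := ∀ (words : String), Dom_big_first_letter words → Spec_big_first_letter words (big_first_letter words)

-- ===== LEMMAS AND PROOFS =====

theorem pv_lowerChar_id (c : Char) (h : 97 ≤ c.toNat ∧ c.toNat ≤ 122) :
    PySem.Chars.lowerChar c = c := by
  simp only [PySem.Chars.lowerChar, PySem.Chars.isupper, Char.le_def, UInt32.le_iff_toNat_le,
    Char.toNat_val, Bool.and_eq_true, decide_eq_true_eq,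
    show 'A'.toNat = 65 from rfl, show 'Z'.toNat = 90 from rfl]
  rw [if_neg]; omega

theorem pv_isalpha_lower (c : Char) (h : 97 ≤ c.toNat ∧ c.toNat ≤ 122) :
    PySem.Chars.isalpha c = true := by
  simp only [PySem.Chars.isalpha, PySem.Chars.isupper, PySem.Chars.islower, Char.le_def,
    UInt32.le_iff_toNat_le, Char.toNat_val, Bool.or_eq_true, Bool.and_eq_true, decide_eq_true_eq,
    show 'a'.toNat = 97 from rfl, show 'z'.toNat = 122 from rfl,
    show 'A'.toNat = 65 from rfl, show 'Z'.toNat = 90 from rfl]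
  omega

theorem pv_valid_mem (w : List Char) (h : pvValidWord w = true) (c : Char) (hc : c ∈ w) :
    97 ≤ c.toNat ∧ c.toNat ≤ 122 := by
  simp only [pvValidWord, List.all_eq_true, Bool.and_eq_true, decide_eq_true_eq] at h
  exact h c hc

-- the title fold, once its flag is true, copies a valid tail unchanged
theorem pv_title_go (cs : List Char) (h : ∀ c ∈ cs, 97 ≤ c.toNat ∧ c.toNat ≤ 122) :
    ∀ acc : List Char,
      (cs.foldl (fun acc c =>
        if PySem.Chars.isalpha c then
          (acc.1 ++ [if acc.2 then PySem.Chars.lowerChar c else PySem.Chars.upperChar c], true)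
        else (acc.1 ++ [c], false)) (acc, true)).1 = acc ++ cs := by
  induction cs with
  | nil => intro acc; simp
  | cons d ds ih =>
    intro acc
    have hd := h d (List.mem_cons_self)
    have hrest := ih (fun c hc => h c (List.mem_cons_of_mem _ hc)) (acc ++ [d])
    simp [pv_isalpha_lower d hd, pv_lowerChar_id d hd, hrest]

theorem pv_title_eq_cap (w : List Char) (h : pvValidWord w = true) : pvTitle w = pvCap w := by
  cases w with
  | nil => rfl
  | cons c cs =>
    have hc := pv_valid_mem _ h c (List.mem_cons_self)
    have hrest := pv_title_go cs (fun d hd => pv_valid_mem _ h d (List.mem_cons_of_mem _ hd))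
      [PySem.Chars.upperChar c]
    simp [pvTitle, pvCap, pv_isalpha_lower c hc, hrest]

theorem pv_count_foldl (w : List Char) : ∀ n : Nat,
    w.foldl (fun n c => if 97 ≤ c.toNat ∧ c.toNat ≤ 122 then n + 1 else n) n
      = n + w.countP (fun c => decide (97 ≤ c.toNat) && decide (c.toNat ≤ 122)) := by
  induction w with
  | nil => intro n; simp
  | cons c cs ih =>
    intro n
    simp only [List.foldl_cons, List.countP_cons, ih]
    by_cases h : 97 ≤ c.toNat ∧ c.toNat ≤ 122
    · rw [if_pos h]; simp [h.1, h.2]; omega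
    · rw [if_neg h]
      have : (decide (97 ≤ c.toNat) && decide (c.toNat ≤ 122)) = false := by
        rcases Decidable.not_and_iff_not_or_not.mp h with h1 | h1 <;> simp [h1]
      simp [this]

theorem pv_count_eq_iff (w : List Char) :
    (w.foldl (fun n c => if 97 ≤ c.toNat ∧ c.toNat ≤ 122 then n + 1 else n) (0 : Nat) = w.length)
      ↔ pvValidWord w = true := by
  rw [pv_count_foldl w 0, Nat.zero_add, pvValidWord, List.countP_eq_length, List.all_eq_true]

theorem pv_loop_valid (ws : List (List Char)) (h : ws.all pvValidWord = true) :
    ∀ s, bflLoop ws s = s ++ (ws.map (fun w => pvCap w ++ [' '])).flatten := by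
  induction ws with
  | nil => intro s; simp [bflLoop]
  | cons w rest ih =>
    intro s
    simp only [List.all_cons, Bool.and_eq_true] at h
    simp only [bflLoop, if_pos ((pv_count_eq_iff w).mpr h.1)]
    rw [ih h.2, pv_title_eq_cap w h.1]
    simp

theorem pv_loop_invalid (ws : List (List Char)) (h : ws.all pvValidWord = false) :
    ∀ s, bflLoop ws s = "можно использовать только маленькие латинские буквы".toList := by
  induction ws with
  | nil => intro s; simp at h
  | cons w rest ih =>
    intro s
    simp only [List.all_cons, Bool.and_eq_false_iff] at h
    by_cases hw : pvValidWord w = true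
    · rcases h with h | h
      · rw [hw] at h; exact absurd h (by simp)
      · simp only [bflLoop, if_pos ((pv_count_eq_iff w).mpr hw)]
        exact ih h _
    · simp only [bflLoop, if_neg (fun hc => hw ((pv_count_eq_iff w).mp hc))]

-- ===== VERDICT (by name: the statement is the Claim_ definition above) =====
theorem big_first_letter_spec : Claim_equal_big_first_letter := by
  intro words _
  unfold Spec_big_first_letter big_first_letter big_first_letter_alt
  by_cases h : (PySem.Chars.split₀ words.toList).all pvValidWord = true
  · rw [if_pos h, pv_loop_valid _ h []]
    simp
  · rw [if_neg h, pv_loop_invalid _ (by simpa using h) []]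
    rfl
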